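-- pv_equiv track=rewrite | github.com/OhJeMIN/algorithm | Programmers/코딩테스트 입문/외계행성의 나이/MunSeoHee.py | solution
-- ===== SOURCE A (Python) =====
-- def solution(age):
--     answer = ""
--     while (1):
--         number = age % 10
--         age = age // 10
--         answer = chr(number + 97) + answer
--         if (age == 0) :
--             return answer
-- ===== SOURCE B (Python) =====
-- def solution(age):
--     return ''.join(chr(int(d) + 97) for d in str(age))
-- ===== Notes on version B (the rewrite author's own statement) =====
-- stated objective: idiomatic
-- what changed: B replaces the least-significant-first modulo/floor-division digit-extraction loop with prepend accumulator by a single str(age) conversion mapped most-significant-first to letters via a join of a generator.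
import Mathlib
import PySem

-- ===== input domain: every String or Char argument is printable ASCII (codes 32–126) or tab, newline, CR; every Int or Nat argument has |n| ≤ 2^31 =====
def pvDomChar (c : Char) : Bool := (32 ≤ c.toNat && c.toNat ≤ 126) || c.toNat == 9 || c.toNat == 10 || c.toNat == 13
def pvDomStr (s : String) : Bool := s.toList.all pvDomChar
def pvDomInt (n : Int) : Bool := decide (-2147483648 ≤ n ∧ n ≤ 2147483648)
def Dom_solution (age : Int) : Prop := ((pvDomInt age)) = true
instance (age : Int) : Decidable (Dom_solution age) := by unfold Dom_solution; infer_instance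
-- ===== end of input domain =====

-- B replaces A's modulo/floor-division digit loop (least-significant-first, prepend accumulator)
-- by mapping the characters of str(age) (most-significant-first) to letters; equivalent for age ≥ 0.

-- ===== PORT A =====
-- A's `while (1)` loop; fuel (age.toNat + 1 at the call site) only makes the recursion total —
-- for age ≥ 0 it is never exhausted (the loop divides age by 10 each step), matching A step for step.
def solutionLoop : Nat → Int → List Char → List Char
  | 0, _, answer => answer
  | fuel + 1, age, answer =>
    let number := PySem.Int.mod age 10
    let age' := PySem.Int.floordiv age 10
    let answer' := Char.ofNat (number + 97).toNat :: answer
    if age' = 0 then answer' else solutionLoop fuel age' answer'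

def solution (age : Int) : String :=
  String.ofList (solutionLoop (age.toNat + 1) age [])

-- ===== PORT B =====
-- chr(int(d) + 97); `int(d)` is PySem.Int.ofChars? — for the digit chars of str(age) with age ≥ 0
-- it is always `some`, so the `.getD 0` total form is never the default.
def convB (d : Char) : Char := Char.ofNat (((PySem.Int.ofChars? [d]).getD 0) + 97).toNat

def solution_alt (age : Int) : String :=
  String.ofList ((PySem.Int.toStr age).toList.map convB)

-- ===== PRECONDITION & SPEC =====
-- Pre_ excludes negative age, on which Python A loops forever (age // 10 stabilises at -1, never 0).
def Pre_solution (age : Int) : Prop := 0 ≤ age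
instance (age : Int) : Decidable (Pre_solution age) := by unfold Pre_solution; infer_instance
def pvWitness_solution : Int := (123)
def Spec_solution (age : Int) (out : String) : Prop := out = solution_alt age
instance (age : Int) (out : String) : Decidable (Spec_solution age out) := by unfold Spec_solution; infer_instance

-- ===== CLAIM (what is proved, stated in full; the proofs are below) =====
def Claim_equal_solution : Prop := ∀ (age : Int), Dom_solution age → Pre_solution age → Spec_solution age (solution age)

-- ===== LEMMAS AND PROOFS =====

-- reference value: the letter string of n's decimal digits, most significant first
def letters : Nat → List Char
  | n =>
    if _h : n < 10 then [Char.ofNat (97 + n)]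
    else letters (n / 10) ++ [Char.ofNat (97 + n % 10)]
  decreasing_by exact Nat.div_lt_self (by omega) (by omega)

lemma letters_lt (n : Nat) (h : n < 10) : letters n = [Char.ofNat (97 + n)] := by
  rw [letters]; simp [h]

lemma letters_ge (n : Nat) (h : ¬ n < 10) :
    letters n = letters (n / 10) ++ [Char.ofNat (97 + n % 10)] := by
  rw [letters]; simp [h]

lemma convB_digitChar (d : Nat) (h : d < 10) : convB (Nat.digitChar d) = Char.ofNat (97 + d) := by
  interval_cases d <;> decide

-- A's loop computes `letters n` in front of the accumulator (fuel f with n < 10^f suffices)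
lemma solutionLoop_eq (f : Nat) : ∀ (n : Nat) (acc : List Char), 0 < f → n < 10 ^ f →
    solutionLoop f (n : Int) acc = letters n ++ acc := by
  induction f with
  | zero => intro n acc h; omega
  | succ f ih =>
    intro n acc _ h
    have hmod : PySem.Int.mod (n : Int) 10 = ((n % 10 : Nat) : Int) := by
      rw [PySem.Int.mod_eq_emod_of_pos (by norm_num)]; omega
    have hdiv : PySem.Int.floordiv (n : Int) 10 = ((n / 10 : Nat) : Int) := by
      rw [PySem.Int.floordiv_eq_ediv_of_pos (by norm_num)]; omega
    simp only [solutionLoop, hmod, hdiv]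
    by_cases h10 : n < 10
    · have hz : ((n / 10 : Nat) : Int) = 0 := by
        have : n / 10 = 0 := Nat.div_eq_of_lt h10
        simp [this]
      rw [if_pos hz, letters_lt n h10]
      have hm : n % 10 = n := Nat.mod_eq_of_lt h10
      have hch : Char.ofNat ((n : Int) + 97).toNat = Char.ofNat (97 + n) := by congr 1; omega
      simp [hm, hch]
    · have hz : ¬ ((n / 10 : Nat) : Int) = 0 := by
        have : n / 10 ≠ 0 := by
          intro h0; exact h10 (Nat.lt_of_div_eq_zero (by omega) h0)
        exact_mod_cast this
      rw [if_neg hz]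
      have hfpos : 0 < f := by
        rcases Nat.eq_zero_or_pos f with hf | hf
        · subst hf; simp at h; omega
        · exact hf
      have hlt : n / 10 < 10 ^ f := by
        have h' : n < 10 * 10 ^ f := by
          have : 10 ^ (f + 1) = 10 * 10 ^ f := by ring
          omega
        exact Nat.div_lt_of_lt_mul h'
      rw [ih (n / 10) _ hfpos hlt, letters_ge n h10]
      have hch : Char.ofNat ((n : Int) % 10 + 97).toNat = Char.ofNat (97 + n % 10) := by
        congr 1; omega
      simp [hch, List.append_assoc]

-- B's map over Nat.toDigitsCore computes `letters n` followed by the mapped accumulator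
lemma toDigitsCore_map_eq (f : Nat) : ∀ (n : Nat) (acc : List Char), 0 < f → n < 10 ^ f →
    (Nat.toDigitsCore 10 f n acc).map convB = letters n ++ acc.map convB := by
  induction f with
  | zero => intro n acc h; omega
  | succ f ih =>
    intro n acc _ h
    simp only [Nat.toDigitsCore]
    by_cases h10 : n < 10
    · have : n / 10 = 0 := Nat.div_eq_of_lt h10
      rw [if_pos this]
      have hm : n % 10 = n := Nat.mod_eq_of_lt h10
      simp [hm, letters_lt n h10, convB_digitChar n h10]
    · have hne : n / 10 ≠ 0 := by
        intro h0; exact h10 (Nat.lt_of_div_eq_zero (by omega) h0)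
      rw [if_neg hne]
      have hfpos : 0 < f := by
        rcases Nat.eq_zero_or_pos f with hf | hf
        · subst hf; simp at h; omega
        · exact hf
      have hlt : n / 10 < 10 ^ f := by
        have h' : n < 10 * 10 ^ f := by
          have : 10 ^ (f + 1) = 10 * 10 ^ f := by ring
          omega
        exact Nat.div_lt_of_lt_mul h'
      rw [ih (n / 10) _ hfpos hlt, letters_ge n h10]
      simp [convB_digitChar (n % 10) (Nat.mod_lt n (by omega)), List.append_assoc]

lemma lt_pow_self_ten (n : Nat) : n < 10 ^ (n + 1) := by
  calc n < 2 ^ n := Nat.lt_two_pow_self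
    _ ≤ 10 ^ n := Nat.pow_le_pow_left (by omega) n
    _ ≤ 10 ^ (n + 1) := Nat.pow_le_pow_right (by omega) (Nat.le_succ n)

-- ===== VERDICT (by name: the statement is the Claim_ definition above) =====
theorem solution_spec : Claim_equal_solution := by
  intro age _ hpre
  unfold Spec_solution solution solution_alt
  obtain ⟨n, rfl⟩ : ∃ n : Nat, age = (n : Int) := ⟨age.toNat, (Int.toNat_of_nonneg hpre).symm⟩
  have hfuel : n < 10 ^ (n + 1) := lt_pow_self_ten n
  rw [PySem.Int.toList_toStr]
  have htochars : PySem.Int.toChars (n : Int) = Nat.toDigitsCore 10 (n + 1) n [] := by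
    simp [PySem.Int.toChars, Nat.toDigits]
  rw [htochars, toDigitsCore_map_eq (n + 1) n [] (by omega) hfuel]
  have : ((n : Int).toNat) = n := by simp
  rw [this, solutionLoop_eq (n + 1) n [] (by omega) hfuel]
  simp
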